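-- pv_equiv track=rewrite | github.com/WonHwang/1D1P_2 | P77486.py | solution
-- ===== SOURCE A (Python) =====
-- class Seller:
--
--     def __init__(self, name, referral):
--         self.name = name
--         self.referral = referral
--         self.amount = 0
--
--     def set_money(self, money, sellers):
--         up = money//10
--         mine = money - up
--         self.amount += mine
--         if up and self.referral != '-':
--             self.up_money(up, sellers)
--
--     def up_money(self, money, sellers):
--         referral = sellers[self.referral]
--         referral.set_money(money, sellers)
--
--     def get_amount(self):
--         return self.amount
--
-- def solution(enroll, referral, seller, amount):
--     answer = []
--     sellers = dict()
--     for i in range(len(enroll)):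
--         sellers[enroll[i]] = Seller(enroll[i], referral[i])
--     for i in range(len(seller)):
--         seller_ = seller[i]
--         money = amount[i]*100
--         seller_ = sellers.get(seller_)
--         seller_.set_money(money, sellers)
--     for seller_ in enroll:
--         answer.append(sellers[seller_].get_amount())
--     return answer
-- ===== SOURCE B (Python) =====
-- def solution(enroll, referral, seller, amount):
--     referral_of = dict(zip(enroll, referral))
--     amounts = {name: 0 for name in enroll}
--     for cur, amt in zip(seller, amount):
--         money = amt * 100
--         while True:
--             up = money // 10
--             amounts[cur] += money - up
--             if up and referral_of[cur] != '-':
--                 money, cur = up, referral_of[cur]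
--             else:
--                 break
--     return [amounts[name] for name in enroll]
-- ===== Notes on version B (the rewrite author's own statement) =====
-- stated objective: simpler
-- what changed: Replaces the Seller class with its mutual set_money/up_money recursion by two plain dicts (name->referral, name->amount) and a single iterative while-loop walking up the referral chain.
import Mathlib
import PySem

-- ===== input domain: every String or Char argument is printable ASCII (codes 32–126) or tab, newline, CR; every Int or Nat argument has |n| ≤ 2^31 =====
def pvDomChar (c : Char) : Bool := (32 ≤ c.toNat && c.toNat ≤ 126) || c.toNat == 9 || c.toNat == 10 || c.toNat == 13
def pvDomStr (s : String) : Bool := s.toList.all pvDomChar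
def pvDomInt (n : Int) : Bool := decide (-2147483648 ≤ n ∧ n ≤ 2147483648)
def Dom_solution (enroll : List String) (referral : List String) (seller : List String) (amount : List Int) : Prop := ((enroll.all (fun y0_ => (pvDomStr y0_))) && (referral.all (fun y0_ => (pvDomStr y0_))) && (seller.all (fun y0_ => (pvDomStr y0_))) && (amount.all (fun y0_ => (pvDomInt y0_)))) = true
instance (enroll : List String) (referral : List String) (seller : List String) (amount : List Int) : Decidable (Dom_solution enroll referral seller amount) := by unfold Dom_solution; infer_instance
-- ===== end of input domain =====

-- B replaces A's Seller class and mutual set_money/up_money recursion by two flat dicts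
-- (name→referral, name→amount) and one iterative chain walk: simpler, same cost.

-- ===== PORT A =====
-- Seller objects are modelled as dict entries name ↦ (referral, amount).
-- pvIdx2 is the body of a Python index loop reading xs[i] and ys[i]: the none branch is
-- where Python raises IndexError (excluded by Pre_), there the loop state is left unchanged.
def pvIdx2 {α β γ : Type} (xs : List α) (ys : List β) (g : γ → α → β → γ) (acc : γ) (i : Int) : γ :=
  match PySem.List.pyGet? xs i, PySem.List.pyGet? ys i with
  | some x, some y => g acc x y
  | _, _ => acc

-- set_money / up_money as one fueled recursion (under Pre_ the walk visits at most
-- enroll.length + 1 names when it runs to '-' and at most 13 when the money runs out first,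
-- so fuel = enroll.length + 40 is never exhausted; get? = none is Python's
-- KeyError/AttributeError, excluded by Pre_, there the state is left unchanged)
def pvSetMoney (fuel : Nat) (money : Int) (name : String)
    (sellers : PySem.Dict String (String × Int)) : PySem.Dict String (String × Int) :=
  match fuel with
  | 0 => sellers
  | fuel + 1 =>
    match sellers.get? name with
    | none => sellers
    | some (ref, amt) =>
      let up := PySem.Int.floordiv money 10
      let mine := money - up
      let sellers := sellers.insert name (ref, amt + mine)
      if up ≠ 0 ∧ ref ≠ "-" then pvSetMoney fuel up ref sellers else sellers

def solution (enroll : List String) (referral : List String) (seller : List String) (amount : List Int) : List Int :=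
  let sellers := (PySem.List.pyRange 0 (enroll.length : Int) 1).foldl
    (pvIdx2 enroll referral (fun d nm rf => d.insert nm (rf, (0 : Int)))) PySem.Dict.empty
  let sellers := (PySem.List.pyRange 0 (seller.length : Int) 1).foldl
    (pvIdx2 seller amount (fun d s a => pvSetMoney (enroll.length + 40) (a * 100) s d)) sellers
  enroll.map (fun nm => ((sellers.get? nm).map (·.2)).getD 0)

-- ===== PORT B =====
-- the while-True chain walk of Source B (fuel plays the loop's termination; get? = none is
-- Python's KeyError, excluded by Pre_, there the loop state is left unchanged)
def pvWalk (fuel : Nat) (money : Int) (cur : String)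
    (refD : PySem.Dict String String) (amts : PySem.Dict String Int) : PySem.Dict String Int :=
  match fuel with
  | 0 => amts
  | fuel + 1 =>
    match amts.get? cur with
    | none => amts
    | some a =>
      let up := PySem.Int.floordiv money 10
      let amts := amts.insert cur (a + (money - up))
      if up ≠ 0 then
        match refD.get? cur with
        | none => amts
        | some r => if r ≠ "-" then pvWalk fuel up r refD amts else amts
      else amts

def solution_alt (enroll : List String) (referral : List String) (seller : List String) (amount : List Int) : List Int :=
  let refD := (enroll.zip referral).foldl (fun d p => d.insert p.1 p.2) PySem.Dict.empty
  let amts := enroll.foldl (fun d nm => d.insert nm (0 : Int)) PySem.Dict.empty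
  let amts := (seller.zip amount).foldl
    (fun d p => pvWalk (enroll.length + 40) (p.2 * 100) p.1 refD d) amts
  enroll.map (fun nm => amts.getD nm 0)

-- ===== PRECONDITION & SPEC =====
-- last-match lookup in an association list = lookup in the dict those pairs build
def pvLookupLast (pairs : List (String × String)) (nm : String) : Option String :=
  match pairs with
  | [] => none
  | p :: rest =>
    match pvLookupLast rest nm with
    | some r => some r
    | none => if p.1 = nm then some p.2 else none

-- the referral chain from nm reaches "-" within at most m lookups, every link being enrolled
def pvChainOk (pairs : List (String × String)) : Nat → String → Bool
  | 0, _ => false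
  | m + 1, nm =>
    match pvLookupLast pairs nm with
    | none => false
    | some r => r = "-" || pvChainOk pairs m r

-- number of climbs a sale of m money makes before the passed-up share floors to 0
def pvClimbsAux : Nat → Nat → Nat
  | 0, _ => 0
  | f + 1, m => if m < 10 then 0 else 1 + pvClimbsAux f (m / 10)

-- 64 division steps suffice for any |amount| ≤ 2^31 of the input domain
def pvClimbs (m : Nat) : Nat := pvClimbsAux 64 m

-- from nm the referral walk stays on enrolled names for k climbs unless it reaches "-" first
def pvPathOk (pairs : List (String × String)) : Nat → String → Bool
  | 0, nm => (pvLookupLast pairs nm).isSome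
  | k + 1, nm =>
    match pvLookupLast pairs nm with
    | none => false
    | some r => r == "-" || pvPathOk pairs k r

-- Pre_ excludes exactly the inputs where A raises: referral shorter than enroll or amount
-- shorter than seller (IndexError), a seller that is not enrolled (AttributeError on None),
-- and a referral walk that leaves the enrolled names before the money runs out (KeyError) —
-- a nonnegative sale makes at most pvClimbs climbs before the passed-up share floors to 0,
-- a negative sale climbs forever, so its walk must reach "-" (else unbounded recursion).
def Pre_solution (enroll : List String) (referral : List String) (seller : List String) (amount : List Int) : Prop :=
  enroll.length ≤ referral.length ∧ seller.length ≤ amount.length ∧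
  (∀ p ∈ seller.zip amount,
    (if p.2 < 0 then pvChainOk (enroll.zip referral) (enroll.length + 1) p.1
     else pvPathOk (enroll.zip referral) (pvClimbs (p.2.toNat * 100)) p.1) = true)

instance (enroll : List String) (referral : List String) (seller : List String) (amount : List Int) : Decidable (Pre_solution enroll referral seller amount) := by unfold Pre_solution; infer_instance

def pvWitness_solution : List String × List String × List String × List Int :=
  (["john", "mary", "edward"], ["-", "john", "mary"], ["edward", "mary"], [12, 5])

def Spec_solution (enroll : List String) (referral : List String) (seller : List String) (amount : List Int) (out : List Int) : Prop := out = solution_alt enroll referral seller amount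
instance (enroll : List String) (referral : List String) (seller : List String) (amount : List Int) (out : List Int) : Decidable (Spec_solution enroll referral seller amount out) := by unfold Spec_solution; infer_instance

-- ===== CLAIM (what is proved, stated in full; the proofs are below) =====
def Claim_equal_solution : Prop := ∀ (enroll : List String) (referral : List String) (seller : List String) (amount : List Int), Dom_solution enroll referral seller amount → Pre_solution enroll referral seller amount → Spec_solution enroll referral seller amount (solution enroll referral seller amount)

-- ===== LEMMAS AND PROOFS =====

-- the simulation relation between A's one dict of (referral, amount) pairs and B's two dicts
def pvRel (d : PySem.Dict String (String × Int))
    (refD : PySem.Dict String String) (amts : PySem.Dict String Int) : Prop :=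
  ∀ nm : String,
    (amts.get? nm = none → d.get? nm = none) ∧
    (∀ a, amts.get? nm = some a → ∃ r, refD.get? nm = some r ∧ d.get? nm = some (r, a))

lemma pvRel_insert {d : PySem.Dict String (String × Int)} {refD : PySem.Dict String String}
    {amts : PySem.Dict String Int} (h : pvRel d refD amts) (nm r : String) (v : Int) :
    pvRel (d.insert nm (r, v)) (refD.insert nm r) (amts.insert nm v) := by
  intro x
  by_cases hx : x = nm
  · subst hx
    simp [PySem.Dict.get?_insert_self]
  · simp only [PySem.Dict.get?_insert_of_ne _ _ hx]
    exact h x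

lemma pvRel_insert_amt {d : PySem.Dict String (String × Int)} {refD : PySem.Dict String String}
    {amts : PySem.Dict String Int} (h : pvRel d refD amts) (nm r : String) (v : Int)
    (hr : refD.get? nm = some r) :
    pvRel (d.insert nm (r, v)) refD (amts.insert nm v) := by
  intro x
  by_cases hx : x = nm
  · subst hx
    simp [PySem.Dict.get?_insert_self, hr]
  · simp only [PySem.Dict.get?_insert_of_ne _ _ hx]
    exact h x

-- one sale: A's recursive set_money and B's iterative walk preserve the simulation
lemma pvStep (f : Nat) :
    ∀ (m : Int) (nm : String) d refD amts, pvRel d refD amts →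
      pvRel (pvSetMoney f m nm d) refD (pvWalk f m nm refD amts) := by
  induction f with
  | zero => intro m nm d refD amts h; simpa [pvSetMoney, pvWalk] using h
  | succ f ih =>
    intro m nm d refD amts h
    rcases ha : amts.get? nm with _ | a
    · have hd : d.get? nm = none := (h nm).1 ha
      simpa [pvSetMoney, pvWalk, ha, hd] using h
    · obtain ⟨r, hr, hd⟩ := (h nm).2 a ha
      have h' : pvRel (d.insert nm (r, a + (m - PySem.Int.floordiv m 10))) refD
          (amts.insert nm (a + (m - PySem.Int.floordiv m 10))) :=
        pvRel_insert_amt h nm r _ hr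
      simp only [pvSetMoney, pvWalk, ha, hd, hr]
      by_cases hu : PySem.Int.floordiv m 10 = 0
      · rw [if_neg (fun hc => hc.1 hu), if_neg (fun hc => hc hu)]
        exact h'
      · by_cases hrd : r = "-"
        · rw [if_neg (fun hc => hc.2 hrd), if_pos hu, if_neg (fun hc => hc hrd)]
          exact h'
        · rw [if_pos ⟨hu, hrd⟩, if_pos hu, if_pos hrd]
          exact ih _ _ _ _ _ h'

-- the three build loops keep the simulation (needs enroll no longer than referral)
lemma pvBuild :
    ∀ (es rs : List String) d refD amts, es.length ≤ rs.length → pvRel d refD amts →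
      pvRel ((es.zip rs).foldl (fun acc p => acc.insert p.1 (p.2, (0 : Int))) d)
            ((es.zip rs).foldl (fun acc p => acc.insert p.1 p.2) refD)
            (es.foldl (fun acc nm => acc.insert nm (0 : Int)) amts) := by
  intro es
  induction es with
  | nil => intro rs d refD amts _ h; simpa using h
  | cons e es ih =>
    intro rs d refD amts hlen h
    cases rs with
    | nil => simp at hlen
    | cons r rs =>
      simp only [List.zip_cons_cons, List.foldl_cons]
      exact ih rs _ _ _ (by simpa using hlen) (pvRel_insert h e r 0)

-- the sales loops keep the simulation
lemma pvSales (F : Nat) :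
    ∀ (ps : List (String × Int)) d refD amts, pvRel d refD amts →
      pvRel (ps.foldl (fun acc p => pvSetMoney F (p.2 * 100) p.1 acc) d) refD
            (ps.foldl (fun acc p => pvWalk F (p.2 * 100) p.1 refD acc) amts) := by
  intro ps
  induction ps with
  | nil => intro d refD amts h; simpa using h
  | cons p ps ih =>
    intro d refD amts h
    simp only [List.foldl_cons]
    exact ih _ _ _ (pvStep F (p.2 * 100) p.1 d refD amts h)

-- a Python index loop over two lists equals a fold over their zip, Nat-index form
lemma pvIdxFoldNat {α β γ : Type} (g : γ → α → β → γ) :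
    ∀ (xs : List α) (ys : List β) (init : γ),
      (List.range xs.length).foldl
        (fun acc k =>
          match xs[k]?, ys[k]? with
          | some x, some y => g acc x y
          | _, _ => acc) init
      = (xs.zip ys).foldl (fun acc p => g acc p.1 p.2) init := by
  intro xs
  induction xs with
  | nil => intro ys init; simp
  | cons x xs ih =>
    intro ys init
    rw [List.length_cons, List.range_succ_eq_map, List.foldl_cons, List.foldl_map]
    cases ys with
    | nil =>
      simp only [List.getElem?_nil, List.zip_nil_right, List.foldl_nil]
      have hfix : ∀ (init' : γ), (List.range xs.length).foldl
          (fun acc k =>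
            match (x :: xs)[k + 1]?, (none : Option β) with
            | some x, some y => g acc x y
            | _, _ => acc) init' = init' := by
        intro init'
        induction List.range xs.length generalizing init' with
        | nil => simp
        | cons k ks ihk =>
          rw [List.foldl_cons]
          cases (x :: xs)[k + 1]? <;> exact ihk _
      cases (x :: xs)[0]? <;> exact hfix init
    | cons y ys =>
      simp only [List.getElem?_cons_zero, List.getElem?_cons_succ, List.zip_cons_cons,
        List.foldl_cons]
      exact ih ys (g init x y)

-- … and the pyRange/pyGet? form the ports use
lemma pvIdxFold {α β γ : Type} (g : γ → α → β → γ) (xs : List α) (ys : List β) (init : γ) :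
    (PySem.List.pyRange 0 (xs.length : Int) 1).foldl (pvIdx2 xs ys g) init
    = (xs.zip ys).foldl (fun acc p => g acc p.1 p.2) init := by
  rw [PySem.List.pyRange_one, List.foldl_map]
  simp only [zero_add, Int.sub_zero, Int.toNat_natCast]
  rw [← pvIdxFoldNat g xs ys init]
  apply PySem.List.foldl_congr_mem
  intro acc k hk
  simp [pvIdx2, PySem.List.pyGet?_natCast]

theorem solution_spec : Claim_equal_solution := by
  intro enroll referral seller amount _hdom hpre
  obtain ⟨hlen1, _hlen2, _hchain⟩ := hpre
  unfold Spec_solution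
  show solution enroll referral seller amount = solution_alt enroll referral seller amount
  simp only [solution, solution_alt]
  rw [pvIdxFold (fun (d : PySem.Dict String (String × Int)) (nm rf : String) =>
        d.insert nm (rf, (0 : Int))) enroll referral,
      pvIdxFold (fun (d : PySem.Dict String (String × Int)) (s : String) (a : Int) =>
        pvSetMoney (enroll.length + 40) (a * 100) s d) seller amount]
  have hrel0 : pvRel PySem.Dict.empty PySem.Dict.empty PySem.Dict.empty := by
    intro nm; simp [PySem.Dict.get?_empty]
  have hrel1 := pvBuild enroll referral _ _ _ hlen1 hrel0
  have hrel := pvSales (enroll.length + 40) (seller.zip amount) _ _ _ hrel1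
  apply List.map_congr_left
  intro nm _
  rcases ha : ((seller.zip amount).foldl
      (fun d p => pvWalk (enroll.length + 40) (p.2 * 100) p.1
        ((enroll.zip referral).foldl (fun d p => d.insert p.1 p.2) PySem.Dict.empty) d)
      (enroll.foldl (fun d nm => d.insert nm (0 : Int)) PySem.Dict.empty)).get? nm with _ | a
  · have hd := (hrel nm).1 ha
    simp [hd, ha, PySem.Dict.getD_eq_get?_getD]
  · obtain ⟨r, _, hd⟩ := (hrel nm).2 a ha
    simp [hd, ha, PySem.Dict.getD_eq_get?_getD]
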